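-- pv_equiv track=rewrite | github.com/bennyd312/Adventofcode24 | 9a.py | Convert_Diskmap_to_sequence
-- ===== SOURCE A (Python) =====
-- def Convert_Diskmap_to_sequence(diskmap):
--     """
--     Converts a diskmap, ie numbers "12345" to [0,.,.,1,1,1,.,.,.,.,2,2,2,2,2] (a sequence)
--     """
--     n = len(diskmap)
--     IDS = [] #id's used
--     freespace_indices = [] #indices of dots / freespace
--     C = [] # sequence without dots
--     sequence = [] #final sequence
--     id_blocks = []
--
--     index = 0
--     current_id = 0
--     sequence_length = 0
--
--     while index<n:
--         if index%2==0:
--             IDS.append(current_id)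
--             for j in range(diskmap[index]):
--                 id_blocks.append(current_id)
--                 sequence.append(current_id)
--                 C.append(current_id)
--                 sequence_length += 1
--             current_id += 1
--             index += 1
--         else:
--             for j in range(diskmap[index]):
--                 id_blocks.append(current_id)
--                 sequence.append(-1)
--                 freespace_indices.append(sequence_length)
--                 sequence_length += 1
--             index += 1
--     return sequence,freespace_indices,C,id_blocks
-- ===== SOURCE B (Python) =====
-- def Convert_Diskmap_to_sequence(diskmap):
--     # Build only sequence and id_blocks in one expansion pass; derive the
--     # freespace indices and the dot-free sequence C afterwards from sequence.
--     sequence = []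
--     id_blocks = []
--     current_id = 0
--     for index, count in enumerate(diskmap):
--         if index % 2 == 0:
--             block = [current_id] * count
--             sequence += block
--             id_blocks += block
--             current_id += 1
--         else:
--             sequence += [-1] * count
--             id_blocks += [current_id] * count
--     freespace_indices = [i for i, x in enumerate(sequence) if x == -1]
--     C = [x for x in sequence if x != -1]
--     return sequence, freespace_indices, C, id_blocks
-- ===== Notes on version B (the rewrite author's own statement) =====
-- stated objective: alternative
-- what changed: B expands the diskmap in a single pass that builds only sequence and id_blocks (extending by whole [id]*count blocks instead of appending block cells one by one in inner loops), then derives freespace_indices and C from the finished sequence by two separate passes; A appends to all four lists cell-by-cell inside nested per-cell loops while tracking a running length counter.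
import Mathlib
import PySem

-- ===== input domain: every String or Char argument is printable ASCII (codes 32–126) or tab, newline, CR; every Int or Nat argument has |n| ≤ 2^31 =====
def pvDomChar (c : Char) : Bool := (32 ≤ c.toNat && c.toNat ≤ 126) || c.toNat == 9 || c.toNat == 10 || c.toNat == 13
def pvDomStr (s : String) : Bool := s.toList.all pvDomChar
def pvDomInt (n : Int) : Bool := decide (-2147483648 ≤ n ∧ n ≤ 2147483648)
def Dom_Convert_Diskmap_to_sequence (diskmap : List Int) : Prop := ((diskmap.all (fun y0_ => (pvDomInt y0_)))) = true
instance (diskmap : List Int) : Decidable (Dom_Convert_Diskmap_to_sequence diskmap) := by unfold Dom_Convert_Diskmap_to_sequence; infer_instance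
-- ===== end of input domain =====

-- B builds only sequence/id_blocks in the expansion pass (whole blocks at a time) and derives
-- freespace_indices and C from the finished sequence in two separate passes (objective: alternative).


-- ===== PORT A =====
-- state of the inner even-index for-loop: (id_blocks, sequence, C, sequence_length)
def pvA_even (cur : Int) (q : List Int × List Int × List Int × Int) (_ : Int) :
    List Int × List Int × List Int × Int :=
  (q.1 ++ [cur], q.2.1 ++ [cur], q.2.2.1 ++ [cur], q.2.2.2 + 1)

-- state of the inner odd-index for-loop: (id_blocks, sequence, freespace_indices, sequence_length)
def pvA_odd (cur : Int) (q : List Int × List Int × List Int × Int) (_ : Int) :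
    List Int × List Int × List Int × Int :=
  (q.1 ++ [cur], q.2.1 ++ [-1], q.2.2.1 ++ [q.2.2.2], q.2.2.2 + 1)

-- one iteration of the while loop; state = (IDS, freespace_indices, C, sequence, id_blocks, current_id, sequence_length)
def pvA_step (st : List Int × List Int × List Int × List Int × List Int × Int × Int)
    (p : Int × Int) : List Int × List Int × List Int × List Int × List Int × Int × Int :=
  let (IDS, free, C, seq, idb, cur, slen) := st
  if p.1 % 2 = 0 then
    let q := (PySem.List.pyRange 0 p.2 1).foldl (pvA_even cur) (idb, seq, C, slen)
    (IDS ++ [cur], free, q.2.2.1, q.2.1, q.1, cur + 1, q.2.2.2)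
  else
    let q := (PySem.List.pyRange 0 p.2 1).foldl (pvA_odd cur) (idb, seq, free, slen)
    (IDS, q.2.2.1, C, q.2.1, q.1, cur, q.2.2.2)

def Convert_Diskmap_to_sequence (diskmap : List Int) : List Int × List Int × List Int × List Int :=
  let st := (PySem.List.enumerate diskmap 0).foldl pvA_step ([], [], [], [], [], 0, 0)
  (st.2.2.2.1, st.2.1, st.2.2.1, st.2.2.2.2.1)

-- ===== PORT B =====
-- expansion pass; state = (sequence, id_blocks, current_id); whole blocks appended at once
def pvB_step (st : List Int × List Int × Int) (p : Int × Int) : List Int × List Int × Int :=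
  let (seq, idb, cur) := st
  if p.1 % 2 = 0 then
    let block := List.replicate p.2.toNat cur
    (seq ++ block, idb ++ block, cur + 1)
  else
    (seq ++ List.replicate p.2.toNat (-1), idb ++ List.replicate p.2.toNat cur, cur)

def Convert_Diskmap_to_sequence_alt (diskmap : List Int) : List Int × List Int × List Int × List Int :=
  let st := (PySem.List.enumerate diskmap 0).foldl pvB_step ([], [], 0)
  let seq := st.1
  (seq,
   (PySem.List.enumerate seq 0).filterMap (fun p => if p.2 == -1 then some p.1 else none),
   seq.filter (fun x => x != -1),
   st.2.1)

-- ===== PRECONDITION & SPEC =====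
def Spec_Convert_Diskmap_to_sequence (diskmap : List Int) (out : List Int × List Int × List Int × List Int) : Prop := out = Convert_Diskmap_to_sequence_alt diskmap
instance (diskmap : List Int) (out : List Int × List Int × List Int × List Int) : Decidable (Spec_Convert_Diskmap_to_sequence diskmap out) := by unfold Spec_Convert_Diskmap_to_sequence; infer_instance

-- ===== CLAIM (what is proved, stated in full; the proofs are below) =====
def Claim_equal_Convert_Diskmap_to_sequence : Prop := ∀ (diskmap : List Int), Dom_Convert_Diskmap_to_sequence diskmap → Spec_Convert_Diskmap_to_sequence diskmap (Convert_Diskmap_to_sequence diskmap)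

-- ===== LEMMAS AND PROOFS =====

-- freespace indices of a sequence suffix starting at absolute offset `off`
def pvFreeFrom (s : List Int) (off : Int) : List Int :=
  (PySem.List.enumerate s off).filterMap (fun p => if p.2 == -1 then some p.1 else none)

theorem pvFreeFrom_nil (off : Int) : pvFreeFrom [] off = [] := by
  simp [pvFreeFrom, PySem.List.enumerate_nil]

theorem pvFreeFrom_cons (x : Int) (s : List Int) (off : Int) :
    pvFreeFrom (x :: s) off =
      (if x == -1 then [off] else []) ++ pvFreeFrom s (off + 1) := by
  simp only [pvFreeFrom, PySem.List.enumerate_cons, List.filterMap_cons]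
  by_cases h : x == -1 <;> simp [h]

theorem pvFreeFrom_append (s t : List Int) (off : Int) :
    pvFreeFrom (s ++ t) off = pvFreeFrom s off ++ pvFreeFrom t (off + s.length) := by
  induction s generalizing off with
  | nil => simp [pvFreeFrom_nil]
  | cons x s ih =>
    simp [pvFreeFrom_cons, ih, List.append_assoc]
    ring_nf

theorem pvFreeFrom_replicate_ne (n : Nat) (c off : Int) (hc : c ≠ -1) :
    pvFreeFrom (List.replicate n c) off = [] := by
  induction n generalizing off with
  | zero => simp [pvFreeFrom_nil]
  | succ n ih => simp [List.replicate_succ, pvFreeFrom_cons, hc, ih]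

theorem pvFreeFrom_replicate_neg (n : Nat) (off : Int) :
    pvFreeFrom (List.replicate n (-1 : Int)) off = PySem.List.pyRange off (off + n) 1 := by
  induction n generalizing off with
  | zero => simp [pvFreeFrom_nil, PySem.List.pyRange_one_eq_nil le_rfl]
  | succ n ih =>
    rw [List.replicate_succ, pvFreeFrom_cons, ih]
    have hb : off + 1 + (n : Int) = off + ((n + 1 : Nat) : Int) := by push_cast; ring
    rw [hb, PySem.List.pyRange_one_cons (by push_cast; omega : off < off + ((n + 1 : Nat) : Int))]
    simp

theorem pvFilter_replicate_ne (n : Nat) (c : Int) (hc : c ≠ -1) :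
    (List.replicate n c).filter (fun x => x != -1) = List.replicate n c := by
  induction n with
  | zero => simp
  | succ n ih => simp [List.replicate_succ, hc, ih]

theorem pvFilter_replicate_neg (n : Nat) :
    (List.replicate n (-1 : Int)).filter (fun x => x != -1) = [] := by
  induction n with
  | zero => simp
  | succ n ih => simp [List.replicate_succ, ih]

-- closed form of the even inner loop
theorem pvA_even_fold (l : List Int) (cur : Int) :
    ∀ (idb seq C : List Int) (slen : Int),
      l.foldl (pvA_even cur) (idb, seq, C, slen)
        = (idb ++ List.replicate l.length cur, seq ++ List.replicate l.length cur,
           C ++ List.replicate l.length cur, slen + l.length) := by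
  induction l with
  | nil => intro idb seq C slen; simp
  | cons x l ih =>
    intro idb seq C slen
    rw [List.foldl_cons]
    show l.foldl (pvA_even cur) (idb ++ [cur], seq ++ [cur], C ++ [cur], slen + 1) = _
    rw [ih]
    simp only [Prod.mk.injEq, List.length_cons]
    refine ⟨?_, ?_, ?_, ?_⟩
    · simp [List.append_assoc, List.replicate_succ]
    · simp [List.append_assoc, List.replicate_succ]
    · simp [List.append_assoc, List.replicate_succ]
    · push_cast; ring

-- closed form of the odd inner loop
theorem pvA_odd_fold (l : List Int) (cur : Int) :
    ∀ (idb seq free : List Int) (slen : Int),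
      l.foldl (pvA_odd cur) (idb, seq, free, slen)
        = (idb ++ List.replicate l.length cur, seq ++ List.replicate l.length (-1),
           free ++ PySem.List.pyRange slen (slen + l.length) 1,
           slen + l.length) := by
  induction l with
  | nil =>
    intro idb seq free slen
    simp [PySem.List.pyRange_one_eq_nil le_rfl]
  | cons x l ih =>
    intro idb seq free slen
    rw [List.foldl_cons]
    show l.foldl (pvA_odd cur) (idb ++ [cur], seq ++ [-1], free ++ [slen], slen + 1) = _
    rw [ih]
    have hb : slen + 1 + (l.length : Int) = slen + ((l.length + 1 : Nat) : Int) := by push_cast; ring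
    rw [hb]
    simp only [Prod.mk.injEq, List.length_cons]
    refine ⟨?_, ?_, ?_, ?_⟩
    · simp [List.append_assoc, List.replicate_succ]
    · simp [List.append_assoc, List.replicate_succ]
    · rw [List.append_assoc, List.singleton_append,
        ← PySem.List.pyRange_one_cons (by push_cast; omega : slen < slen + ((l.length + 1 : Nat) : Int))]
    · trivial

-- main invariant: A's fold equals B's fold plus the derived components
theorem pvMain (l : List (Int × Int)) :
    ∀ (IDS seq idb : List Int) (cur : Int), 0 ≤ cur →
      ∃ I : List Int,
        l.foldl pvA_step
          (IDS, pvFreeFrom seq 0, seq.filter (fun x => x != -1), seq, idb, cur, (seq.length : Int))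
        = (I, pvFreeFrom (l.foldl pvB_step (seq, idb, cur)).1 0,
             (l.foldl pvB_step (seq, idb, cur)).1.filter (fun x => x != -1),
             (l.foldl pvB_step (seq, idb, cur)).1,
             (l.foldl pvB_step (seq, idb, cur)).2.1,
             (l.foldl pvB_step (seq, idb, cur)).2.2,
             ((l.foldl pvB_step (seq, idb, cur)).1.length : Int)) := by
  induction l with
  | nil => intro IDS seq idb cur _; exact ⟨IDS, rfl⟩
  | cons p l ih =>
    intro IDS seq idb cur hcur
    have hlen : (PySem.List.pyRange 0 p.2 1).length = p.2.toNat := by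
      rw [PySem.List.length_pyRange_one]; simp
    by_cases hp : p.1 % 2 = 0
    · have hc : cur ≠ -1 := by omega
      have hA : pvA_step (IDS, pvFreeFrom seq 0, seq.filter (fun x => x != -1), seq, idb, cur, (seq.length : Int)) p
          = (IDS ++ [cur],
             pvFreeFrom (seq ++ List.replicate p.2.toNat cur) 0,
             (seq ++ List.replicate p.2.toNat cur).filter (fun x => x != -1),
             seq ++ List.replicate p.2.toNat cur,
             idb ++ List.replicate p.2.toNat cur,
             cur + 1,
             ((seq ++ List.replicate p.2.toNat cur).length : Int)) := by
        simp only [pvA_step, if_pos hp, pvA_even_fold, hlen, pvFreeFrom_append,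
          pvFreeFrom_replicate_ne _ _ _ hc, List.append_nil, List.filter_append,
          pvFilter_replicate_ne _ _ hc, List.length_append, Nat.cast_add, List.length_replicate]
      have hB : pvB_step (seq, idb, cur) p
          = (seq ++ List.replicate p.2.toNat cur, idb ++ List.replicate p.2.toNat cur, cur + 1) := by
        simp only [pvB_step, if_pos hp]
      rw [List.foldl_cons, hA, List.foldl_cons, hB]
      exact ih (IDS ++ [cur]) _ _ _ (by omega)
    · have hA : pvA_step (IDS, pvFreeFrom seq 0, seq.filter (fun x => x != -1), seq, idb, cur, (seq.length : Int)) p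
          = (IDS,
             pvFreeFrom (seq ++ List.replicate p.2.toNat (-1)) 0,
             (seq ++ List.replicate p.2.toNat (-1)).filter (fun x => x != -1),
             seq ++ List.replicate p.2.toNat (-1),
             idb ++ List.replicate p.2.toNat cur,
             cur,
             ((seq ++ List.replicate p.2.toNat (-1)).length : Int)) := by
        simp only [pvA_step, if_neg hp, pvA_odd_fold, hlen, pvFreeFrom_append,
          pvFreeFrom_replicate_neg, List.filter_append, pvFilter_replicate_neg,
          List.append_nil, List.length_append, Nat.cast_add, zero_add, List.length_replicate]
      have hB : pvB_step (seq, idb, cur) p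
          = (seq ++ List.replicate p.2.toNat (-1), idb ++ List.replicate p.2.toNat cur, cur) := by
        simp only [pvB_step, if_neg hp]
      rw [List.foldl_cons, hA, List.foldl_cons, hB]
      exact ih IDS _ _ _ hcur

-- ===== VERDICT (by name: the statement is the Claim_ definition above) =====
theorem Convert_Diskmap_to_sequence_spec : Claim_equal_Convert_Diskmap_to_sequence := by
  intro diskmap _
  unfold Spec_Convert_Diskmap_to_sequence Convert_Diskmap_to_sequence Convert_Diskmap_to_sequence_alt
  obtain ⟨I, hI⟩ := pvMain (PySem.List.enumerate diskmap 0) [] [] [] 0 le_rfl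
  simp only [pvFreeFrom_nil, List.filter_nil, List.length_nil, Nat.cast_zero] at hI
  simp only [hI, pvFreeFrom]
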